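-- pv_equiv track=rewrite | github.com/EduBarb0sa/Ler_CSV | Ler.py | contar_elemento3
-- ===== SOURCE A (Python) =====
-- def contar_elemento3(lista, elemento3, elemento8, elemento6, elemento9, elemento12, elemento15):
--     contador = 0
--     for linha in lista:
--         for item in linha:
--             if item == elemento3:
--                 contador += 1
--             if item == elemento8:
--                 contador += 1
--             if item == elemento6:
--                 contador += 2
--             if item == elemento9:
--                 contador += 3
--             if item == elemento12:
--                 contador += 4
--             if item == elemento15:
--                 contador += 5
--     return contador
-- ===== SOURCE B (Python) =====
-- def contar_elemento3(lista, elemento3, elemento8, elemento6, elemento9, elemento12, elemento15):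
--     flat = [item for linha in lista for item in linha]
--     return (flat.count(elemento3)
--             + flat.count(elemento8)
--             + 2 * flat.count(elemento6)
--             + 3 * flat.count(elemento9)
--             + 4 * flat.count(elemento12)
--             + 5 * flat.count(elemento15))
-- ===== Notes on version B (the rewrite author's own statement) =====
-- stated objective: simpler
-- what changed: Flattens the nested list once, then computes the result as a closed weighted sum of six list.count() passes (one per target), instead of maintaining a counter with six per-item branches inside nested loops.
import Mathlib
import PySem

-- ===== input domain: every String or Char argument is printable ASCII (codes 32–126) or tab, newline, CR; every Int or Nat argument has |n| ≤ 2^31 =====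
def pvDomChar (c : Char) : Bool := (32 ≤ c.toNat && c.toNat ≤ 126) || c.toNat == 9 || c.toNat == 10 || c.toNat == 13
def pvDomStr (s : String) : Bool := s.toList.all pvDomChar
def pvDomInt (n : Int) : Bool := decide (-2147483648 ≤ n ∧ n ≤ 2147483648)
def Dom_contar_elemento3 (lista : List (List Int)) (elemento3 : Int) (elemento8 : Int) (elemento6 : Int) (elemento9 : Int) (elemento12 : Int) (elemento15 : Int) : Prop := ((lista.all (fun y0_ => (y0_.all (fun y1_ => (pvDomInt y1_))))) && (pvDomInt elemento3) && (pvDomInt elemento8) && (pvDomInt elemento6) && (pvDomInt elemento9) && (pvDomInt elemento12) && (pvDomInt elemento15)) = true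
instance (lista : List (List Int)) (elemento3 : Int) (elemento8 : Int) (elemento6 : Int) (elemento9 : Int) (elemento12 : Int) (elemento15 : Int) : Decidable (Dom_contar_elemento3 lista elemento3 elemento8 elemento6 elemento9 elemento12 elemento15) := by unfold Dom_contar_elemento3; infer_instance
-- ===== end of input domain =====

-- B flattens the nested list once and returns a weighted sum of six count() passes; same value, simpler decomposition.


-- ===== PORT A =====
def contar_elemento3 (lista : List (List Int)) (elemento3 : Int) (elemento8 : Int) (elemento6 : Int) (elemento9 : Int) (elemento12 : Int) (elemento15 : Int) : Int :=
  lista.foldl (fun contador linha =>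
    linha.foldl (fun contador item =>
      let contador := if item == elemento3 then contador + 1 else contador
      let contador := if item == elemento8 then contador + 1 else contador
      let contador := if item == elemento6 then contador + 2 else contador
      let contador := if item == elemento9 then contador + 3 else contador
      let contador := if item == elemento12 then contador + 4 else contador
      let contador := if item == elemento15 then contador + 5 else contador
      contador) contador) 0

-- ===== PORT B =====
def contar_elemento3_alt (lista : List (List Int)) (elemento3 : Int) (elemento8 : Int) (elemento6 : Int) (elemento9 : Int) (elemento12 : Int) (elemento15 : Int) : Int :=
  let flat := lista.flatMap (fun linha => linha)
  (PySem.List.count flat elemento3 : Int)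
  + (PySem.List.count flat elemento8 : Int)
  + 2 * (PySem.List.count flat elemento6 : Int)
  + 3 * (PySem.List.count flat elemento9 : Int)
  + 4 * (PySem.List.count flat elemento12 : Int)
  + 5 * (PySem.List.count flat elemento15 : Int)

-- ===== PRECONDITION & SPEC =====
def Spec_contar_elemento3 (lista : List (List Int)) (elemento3 : Int) (elemento8 : Int) (elemento6 : Int) (elemento9 : Int) (elemento12 : Int) (elemento15 : Int) (out : Int) : Prop := out = contar_elemento3_alt lista elemento3 elemento8 elemento6 elemento9 elemento12 elemento15
instance (lista : List (List Int)) (elemento3 : Int) (elemento8 : Int) (elemento6 : Int) (elemento9 : Int) (elemento12 : Int) (elemento15 : Int) (out : Int) : Decidable (Spec_contar_elemento3 lista elemento3 elemento8 elemento6 elemento9 elemento12 elemento15 out) := by unfold Spec_contar_elemento3; infer_instance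

-- ===== CLAIM =====
def Claim_equal_contar_elemento3 : Prop := ∀ (lista : List (List Int)) (elemento3 : Int) (elemento8 : Int) (elemento6 : Int) (elemento9 : Int) (elemento12 : Int) (elemento15 : Int), Dom_contar_elemento3 lista elemento3 elemento8 elemento6 elemento9 elemento12 elemento15 → Spec_contar_elemento3 lista elemento3 elemento8 elemento6 elemento9 elemento12 elemento15 (contar_elemento3 lista elemento3 elemento8 elemento6 elemento9 elemento12 elemento15)

-- ===== LEMMAS AND PROOFS =====

-- A's inner step over a single flat list, from any start counter, is that counter plus the weighted counts.
lemma foldl_step_counts (e3 e8 e6 e9 e12 e15 : Int) (xs : List Int) (c : Int) :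
    xs.foldl (fun contador item =>
      let contador := if item == e3 then contador + 1 else contador
      let contador := if item == e8 then contador + 1 else contador
      let contador := if item == e6 then contador + 2 else contador
      let contador := if item == e9 then contador + 3 else contador
      let contador := if item == e12 then contador + 4 else contador
      let contador := if item == e15 then contador + 5 else contador
      contador) c =
    c + (List.count e3 xs : Int) + (List.count e8 xs : Int) + 2 * (List.count e6 xs : Int)
      + 3 * (List.count e9 xs : Int) + 4 * (List.count e12 xs : Int) + 5 * (List.count e15 xs : Int) := by
  induction xs generalizing c with
  | nil => simp
  | cons x xs ih =>
    simp only [List.foldl_cons, ih, List.count_cons]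
    push_cast
    split_ifs <;> omega

theorem contar_elemento3_spec : Claim_equal_contar_elemento3 := by
  intro lista e3 e8 e6 e9 e12 e15 _
  unfold Spec_contar_elemento3 contar_elemento3 contar_elemento3_alt
  rw [show lista.flatMap (fun linha => linha) = lista.flatten by simp [List.flatMap]]
  rw [← List.foldl_flatten]
  simp only [PySem.List.count_eq]
  rw [foldl_step_counts]
  ring
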